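-- pv_equiv track=rewrite | github.com/anamillen/Yandex-DSA-Handbook | 6. Жадные алгоритмы/6.4. Задача «Сбор подписей»/Минимальная суммарная длина отрезков.py | min_sum_of_segments
-- ===== SOURCE A (Python) =====
-- def min_sum_of_segments(N_POINTS, MAX_SEGMENTS, points):
--     """Returns the minimum sum of lengths of k segments needed to cover all the points"""
--     points = sorted(points)
--     distances = sorted([points[i+1]-points[i] for i in range(N_POINTS-1)], reverse=True)
--     segment_sum = points[-1] - points[0]
--     segment_count = 1
--     ind_max_dist = 0
--     # while we still have spare segments to use we can 'cut' the segments which cover the greatest distances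
--     while segment_count<MAX_SEGMENTS and ind_max_dist<N_POINTS-1:
--         segment_sum-=distances[ind_max_dist]
--         ind_max_dist+=1
--         segment_count+=1
--     # from here on out we have used up all k segments (segment_count==MAX_SEGMENTS)
--     # or we already have 'cut' all the distances (ind_max_dist==N_POINTS-1)
--     return segment_sum
-- ===== SOURCE B (Python) =====
-- def min_sum_of_segments(N_POINTS, MAX_SEGMENTS, points):
--     """Returns the minimum sum of lengths of k segments needed to cover all the points"""
--     pts = sorted(points)
--     span = pts[-1] - pts[0]
--     top = []  # bounded buffer: the up-to-(MAX_SEGMENTS-1) largest gaps seen so far, ascending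
--     for i in range(N_POINTS - 1):
--         g = pts[i + 1] - pts[i]
--         # binary search: insertion point after all buffered gaps <= g
--         lo, hi = 0, len(top)
--         while lo < hi:
--             mid = (lo + hi) // 2
--             if top[mid] <= g:
--                 lo = mid + 1
--             else:
--                 hi = mid
--         top.insert(lo, g)
--         if len(top) > MAX_SEGMENTS - 1:
--             del top[0]
--     return span - sum(top)
-- ===== Notes on version B (the rewrite author's own statement) =====
-- stated objective: alternative
-- what changed: Instead of sorting the gap list descending and looping to subtract the leading gaps, B streams over the unsorted gaps once, maintaining a bounded ascending buffer of the MAX_SEGMENTS-1 largest gaps seen so far (online top-k selection by bounded insertion), and subtracts the buffer's sum from the span.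
import Mathlib
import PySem

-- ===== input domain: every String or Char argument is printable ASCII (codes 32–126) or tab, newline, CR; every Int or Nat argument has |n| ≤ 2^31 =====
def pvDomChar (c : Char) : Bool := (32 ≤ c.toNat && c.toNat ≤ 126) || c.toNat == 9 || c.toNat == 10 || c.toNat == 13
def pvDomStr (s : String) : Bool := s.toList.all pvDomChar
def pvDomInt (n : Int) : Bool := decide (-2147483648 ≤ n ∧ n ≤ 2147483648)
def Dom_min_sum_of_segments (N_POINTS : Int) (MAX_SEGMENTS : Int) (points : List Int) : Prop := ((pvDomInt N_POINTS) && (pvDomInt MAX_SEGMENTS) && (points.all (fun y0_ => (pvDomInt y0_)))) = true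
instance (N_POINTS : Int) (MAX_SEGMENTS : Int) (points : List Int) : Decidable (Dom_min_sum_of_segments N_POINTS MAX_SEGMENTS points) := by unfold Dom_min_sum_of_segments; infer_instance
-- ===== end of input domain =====

-- B replaces A's descending gap sort + subtraction loop by a single pass over the
-- unsorted gaps maintaining a bounded ascending buffer of the MAX_SEGMENTS-1
-- largest gaps (online top-k selection with binary-search insertion); objective:
-- alternative algorithm.

-- ===== PORT A =====
-- the while loop of A: state (segment_sum, segment_count, ind_max_dist)
def minSumLoopA (N M : Int) (distances : List Int) (ssum cnt ind : Int) : Int :=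
  if _h : cnt < M ∧ ind < N - 1 then
    minSumLoopA N M distances (ssum - PySem.List.pyGetD distances ind 0) (cnt + 1) (ind + 1)
  else ssum
termination_by (M - cnt).toNat
decreasing_by omega

def min_sum_of_segments (N_POINTS : Int) (MAX_SEGMENTS : Int) (points : List Int) : Int :=
  let pts := PySem.List.sorted points (fun x => x) false
  let distances := PySem.List.sorted
    ((PySem.List.pyRange 0 (N_POINTS - 1) 1).map
      (fun i => PySem.List.pyGetD pts (i + 1) 0 - PySem.List.pyGetD pts i 0))
    (fun x => x) true
  let segment_sum := PySem.List.pyGetD pts (-1) 0 - PySem.List.pyGetD pts 0 0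
  minSumLoopA N_POINTS MAX_SEGMENTS distances segment_sum 1 0

-- ===== PORT B =====
-- the 'while lo < hi' binary-search scan for the insertion point of g in top
def bisectLoop (top : List Int) (g : Int) (lo hi : Nat) : Nat :=
  if _h : lo < hi then
    let mid := (lo + hi) / 2
    if top.getD mid 0 ≤ g then bisectLoop top g (mid + 1) hi
    else bisectLoop top g lo mid
  else lo
termination_by hi - lo
decreasing_by all_goals omega

-- top.insert(lo, g) at the position the binary search found
def insertAsc (top : List Int) (g : Int) : List Int :=
  PySem.List.insert top ((bisectLoop top g 0 top.length : Nat) : Int) g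

def min_sum_of_segments_alt (N_POINTS : Int) (MAX_SEGMENTS : Int) (points : List Int) : Int :=
  let pts := PySem.List.sorted points (fun x => x) false
  let span := PySem.List.pyGetD pts (-1) 0 - PySem.List.pyGetD pts 0 0
  let top := (PySem.List.pyRange 0 (N_POINTS - 1) 1).foldl
    (fun top i =>
      let t := insertAsc top (PySem.List.pyGetD pts (i + 1) 0 - PySem.List.pyGetD pts i 0)
      if (MAX_SEGMENTS - 1 : Int) < (t.length : Int) then t.drop 1 else t) []
  span - top.sum

-- ===== PRECONDITION & SPEC =====
-- Pre_ excludes exactly the inputs where A raises IndexError: empty points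
-- (points[-1]) and N_POINTS > len(points) (points[i+1] in the gap comprehension).
def Pre_min_sum_of_segments (N_POINTS : Int) (MAX_SEGMENTS : Int) (points : List Int) : Prop :=
  points ≠ [] ∧ N_POINTS ≤ (points.length : Int)
instance (N_POINTS : Int) (MAX_SEGMENTS : Int) (points : List Int) : Decidable (Pre_min_sum_of_segments N_POINTS MAX_SEGMENTS points) := by unfold Pre_min_sum_of_segments; infer_instance
def pvWitness_min_sum_of_segments : Int × Int × List Int := (3, 2, [1, 5, 10])

def Spec_min_sum_of_segments (N_POINTS : Int) (MAX_SEGMENTS : Int) (points : List Int) (out : Int) : Prop := out = min_sum_of_segments_alt N_POINTS MAX_SEGMENTS points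
instance (N_POINTS : Int) (MAX_SEGMENTS : Int) (points : List Int) (out : Int) : Decidable (Spec_min_sum_of_segments N_POINTS MAX_SEGMENTS points out) := by unfold Spec_min_sum_of_segments; infer_instance

-- ===== CLAIM (what is proved, stated in full; the proofs are below) =====
def Claim_equal_min_sum_of_segments : Prop := ∀ (N_POINTS : Int) (MAX_SEGMENTS : Int) (points : List Int), Dom_min_sum_of_segments N_POINTS MAX_SEGMENTS points → Pre_min_sum_of_segments N_POINTS MAX_SEGMENTS points → Spec_min_sum_of_segments N_POINTS MAX_SEGMENTS points (min_sum_of_segments N_POINTS MAX_SEGMENTS points)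

-- ===== LEMMAS AND PROOFS =====

-- A's descending gap sort is the reverse of the ascending one (values sorted by identity)
theorem desc_eq_reverse_asc (xs : List Int) :
    PySem.List.sorted xs (fun x => x) true = (PySem.List.sorted xs (fun x => x) false).reverse := by
  have hperm : (PySem.List.sorted xs (fun x => x) true).reverse.Perm
      (PySem.List.sorted xs (fun x => x) false) :=
    ((List.reverse_perm _).trans (PySem.List.sorted_perm xs (fun x => x) true)).trans
      (PySem.List.sorted_perm xs (fun x => x) false).symm
  have h1 : (PySem.List.sorted xs (fun x => x) true).reverse.Pairwise (· ≤ ·) := by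
    rw [List.pairwise_reverse]
    exact PySem.List.sorted_pairwise_rev xs (fun x => x)
  have h2 : (PySem.List.sorted xs (fun x => x) false).Pairwise (· ≤ ·) :=
    PySem.List.sorted_pairwise xs (fun x => x)
  have := hperm.eq_of_pairwise (fun a b _ _ h h' => le_antisymm h h') h1 h2
  rw [← this, List.reverse_reverse]

-- A's loop subtracts the first min(M-cnt, N-1-ind) entries of the gap list
theorem loopA_sum_aux (N M : Int) (d : List Int) (hd : (N - 1 : Int) ≤ (d.length : Int)) :
    ∀ (n : Nat) (cnt ind ssum : Int), (M - cnt).toNat ≤ n → 0 ≤ ind →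
      minSumLoopA N M d ssum cnt ind
        = ssum - ((d.drop ind.toNat).take (min (M - cnt) (N - 1 - ind)).toNat).sum := by
  intro n
  induction n with
  | zero =>
    intro cnt ind ssum hn h0
    rw [minSumLoopA]
    have hM : M ≤ cnt := by omega
    have : (min (M - cnt) (N - 1 - ind)).toNat = 0 := by omega
    rw [this]
    simp
    omega
  | succ n ih =>
    intro cnt ind ssum hn h0
    rw [minSumLoopA]
    split_ifs with h
    · obtain ⟨h1, h2⟩ := h
      rw [ih (cnt + 1) (ind + 1) _ (by omega) (by omega)]
      have hlt : ind.toNat < d.length := by omega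
      have hdrop : d.drop ind.toNat = d[ind.toNat] :: d.drop (ind.toNat + 1) :=
        List.drop_eq_getElem_cons hlt
      have hind1 : (ind + 1).toNat = ind.toNat + 1 := by omega
      have ht : (min (M - cnt) (N - 1 - ind)).toNat
          = (min (M - (cnt + 1)) (N - 1 - (ind + 1))).toNat + 1 := by omega
      have hg : PySem.List.pyGetD d ind 0 = d[ind.toNat] :=
        @PySem.List.pyGetD_eq_getElem Int d ind 0 h0 (by omega)
      rw [hind1, ht, hdrop, List.take_succ_cons, List.sum_cons, hg]
      ring
    · have : (min (M - cnt) (N - 1 - ind)).toNat = 0 := by omega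
      rw [this]
      simp

theorem loopA_sum (N M : Int) (d : List Int) (hd : (N - 1 : Int) ≤ (d.length : Int))
    (cnt ind ssum : Int) (h0 : 0 ≤ ind) :
    minSumLoopA N M d ssum cnt ind
      = ssum - ((d.drop ind.toNat).take (min (M - cnt) (N - 1 - ind)).toNat).sum :=
  loopA_sum_aux N M d hd (M - cnt).toNat cnt ind ssum le_rfl h0

-- the position B's binary search finds, characterised structurally: length of the leading run ≤ g
def insertPos (top : List Int) (g : Int) : Nat :=
  match top with
  | [] => 0
  | a :: t => if a ≤ g then insertPos t g + 1 else 0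

-- insertion at insertPos, the proof-side model of insertAsc on sorted buffers
def insertP (top : List Int) (g : Int) : List Int :=
  top.take (insertPos top g) ++ g :: top.drop (insertPos top g)

theorem insertPos_le_length (top : List Int) (g : Int) : insertPos top g ≤ top.length := by
  induction top with
  | nil => exact Nat.le_refl 0
  | cons a t ih =>
    unfold insertPos
    split_ifs
    · simp only [List.length_cons]
      omega
    · simp

theorem insertPos_eq_of (g : Int) :
    ∀ (top : List Int) (lo : Nat), lo ≤ top.length →
      (∀ i, i < lo → top.getD i 0 ≤ g) → (lo < top.length → ¬ top.getD lo 0 ≤ g) →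
      insertPos top g = lo := by
  intro top
  induction top with
  | nil =>
    intro lo hle _ _
    have h0 : lo = 0 := by simpa using hle
    subst h0
    rfl
  | cons a t ih =>
    intro lo hle hlow hhi
    cases lo with
    | zero =>
      have : ¬ a ≤ g := by
        have := hhi (by simp)
        simpa using this
      unfold insertPos
      rw [if_neg this]
    | succ lo' =>
      have ha : a ≤ g := by simpa using hlow 0 (Nat.succ_pos lo')
      unfold insertPos
      rw [if_pos ha]
      have := ih lo' (by simpa using hle)
        (fun i hi => by simpa using hlow (i + 1) (by omega))
        (fun hlt => by simpa using hhi (by simpa using hlt))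
      omega

theorem pairwise_getD_le (top : List Int) (h : top.Pairwise (· ≤ ·)) (i j : Nat)
    (hij : i ≤ j) (hj : j < top.length) : top.getD i 0 ≤ top.getD j 0 := by
  rw [List.getD_eq_getElem top 0 (lt_of_le_of_lt hij hj), List.getD_eq_getElem top 0 hj]
  rcases Nat.lt_or_ge i j with hlt | hge
  · exact List.pairwise_iff_getElem.mp h i j _ hj hlt
  · have : i = j := by omega
    subst this
    exact le_refl _

theorem bisectLoop_eq (top : List Int) (g : Int) (h : top.Pairwise (· ≤ ·)) :
    ∀ (n lo hi : Nat), hi - lo ≤ n → lo ≤ hi → hi ≤ top.length →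
      (∀ i, i < lo → top.getD i 0 ≤ g) →
      (∀ i, hi ≤ i → i < top.length → ¬ top.getD i 0 ≤ g) →
      bisectLoop top g lo hi = insertPos top g := by
  intro n
  induction n with
  | zero =>
    intro lo hi hn hlh hhl hlow hhi
    rw [bisectLoop]
    rw [dif_neg (by omega)]
    exact (insertPos_eq_of g top lo (by omega) hlow
      (fun hlt => hhi lo (by omega) hlt)).symm
  | succ n ih =>
    intro lo hi hn hlh hhl hlow hhi
    by_cases hlt : lo < hi
    · rw [bisectLoop, dif_pos hlt]
      dsimp only
      by_cases h2 : top.getD ((lo + hi) / 2) 0 ≤ g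
      · -- top[mid] ≤ g : recurse on (mid+1, hi)
        rw [if_pos h2]
        refine ih ((lo + hi) / 2 + 1) hi (by omega) (by omega) hhl ?_ hhi
        intro i hi'
        exact le_trans (pairwise_getD_le top h i ((lo + hi) / 2) (by omega) (by omega)) h2
      · -- top[mid] > g : recurse on (lo, mid)
        rw [if_neg h2]
        refine ih lo ((lo + hi) / 2) (by omega) (by omega) (by omega) hlow ?_
        intro i hge hlt'
        exact fun hc => h2 (le_trans (pairwise_getD_le top h ((lo + hi) / 2) i hge hlt') hc)
    · rw [bisectLoop, dif_neg hlt]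
      exact (insertPos_eq_of g top lo (by omega) hlow
        (fun hl => hhi lo (by omega) hl)).symm

theorem insertAsc_eq_insertP (top : List Int) (g : Int) (h : top.Pairwise (· ≤ ·)) :
    insertAsc top g = insertP top g := by
  unfold insertAsc insertP
  have hb : bisectLoop top g 0 top.length = insertPos top g :=
    bisectLoop_eq top g h top.length 0 top.length (by omega) (by omega) le_rfl
      (fun i hi => absurd hi (Nat.not_lt_zero i)) (fun i h1 h2 => absurd h2 (by omega))
  rw [hb, PySem.List.insert_natCast top (insertPos top g) g (insertPos_le_length top g)]

-- structural recursion of insertP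
theorem insertP_nil (g : Int) : insertP [] g = [g] := rfl

theorem insertP_cons (a g : Int) (t : List Int) :
    insertP (a :: t) g = if a ≤ g then a :: insertP t g else g :: a :: t := by
  unfold insertP
  have hp : insertPos (a :: t) g = if a ≤ g then insertPos t g + 1 else 0 := rfl
  rw [hp]
  split_ifs with h <;> simp

theorem insertP_length (L : List Int) (g : Int) : (insertP L g).length = L.length + 1 := by
  induction L with
  | nil => rfl
  | cons a t ih =>
    rw [insertP_cons]
    split_ifs <;> simp [ih]

theorem insertP_perm (L : List Int) (g : Int) : (insertP L g).Perm (g :: L) := by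
  induction L with
  | nil => exact List.Perm.refl _
  | cons a t ih =>
    rw [insertP_cons]
    split_ifs
    · exact (ih.cons a).trans (List.Perm.swap g a t)
    · exact List.Perm.refl _

theorem insertP_pairwise (L : List Int) (g : Int) (hL : L.Pairwise (· ≤ ·)) :
    (insertP L g).Pairwise (· ≤ ·) := by
  induction L with
  | nil => simp [insertP_nil]
  | cons a t ih =>
    rw [List.pairwise_cons] at hL
    obtain ⟨ha, ht⟩ := hL
    rw [insertP_cons]
    split_ifs with h
    · rw [List.pairwise_cons]
      refine ⟨fun x hx => ?_, ih ht⟩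
      rcases List.mem_cons.mp ((insertP_perm t g).mem_iff.mp hx) with h' | h'
      · omega
      · exact ha x h'
    · rw [List.pairwise_cons]
      refine ⟨fun x hx => ?_, List.pairwise_cons.mpr ⟨ha, ht⟩⟩
      rcases List.mem_cons.mp hx with h' | h'
      · omega
      · exact le_trans (by omega) (ha x h')

-- trimming the inserted buffer = dropping one more of the fully-inserted sorted list
theorem insertP_drop_tail (g : Int) :
    ∀ (d : Nat) (L : List Int), L.Pairwise (· ≤ ·) →
      (insertP (L.drop d) g).drop 1 = (insertP L g).drop (d + 1) := by
  intro d
  induction d with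
  | zero => intro L _; simp
  | succ d ih =>
    intro L hL
    cases L with
    | nil => simp [insertP_nil]
    | cons a t =>
      rw [List.pairwise_cons] at hL
      obtain ⟨ha, ht⟩ := hL
      rw [List.drop_succ_cons, ih t ht, insertP_cons]
      split_ifs with h
      · rw [List.drop_succ_cons]
      · -- a > g, so g is below every element of t: insertP t g = g :: t
        have htg : insertP t g = g :: t := by
          cases t with
          | nil => rfl
          | cons b t' =>
            rw [insertP_cons, if_neg (by have := ha b (by simp); omega)]
        rw [htg]
        simp

-- on sorted states the whole fold can use insertP
theorem foldl_insertAsc_eq (xs : List Int) :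
    ∀ (L : List Int), L.Pairwise (· ≤ ·) →
      xs.foldl (fun acc g => insertAsc acc g) L = xs.foldl (fun acc g => insertP acc g) L := by
  induction xs with
  | nil => intro L _; rfl
  | cons g rest ih =>
    intro L hL
    rw [List.foldl_cons, List.foldl_cons, insertAsc_eq_insertP L g hL]
    exact ih (insertP L g) (insertP_pairwise L g hL)

-- the sort B computes incrementally
def isortB (xs : List Int) : List Int := xs.foldl (fun acc g => insertAsc acc g) []

theorem isortB_perm (xs : List Int) : (isortB xs).Perm xs := by
  suffices h : ∀ (xs L : List Int), (xs.foldl (fun acc g => insertP acc g) L).Perm (L ++ xs) by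
    have := h xs []
    rw [isortB, foldl_insertAsc_eq xs [] (by simp)]
    simpa using this
  intro xs
  induction xs with
  | nil => simp
  | cons g rest ih =>
    intro L
    rw [List.foldl_cons]
    refine (ih (insertP L g)).trans ?_
    refine (List.Perm.append_right rest ((insertP_perm L g))).trans ?_
    simpa using (List.perm_middle (a := g) (l₁ := L) (l₂ := rest)).symm

theorem isortB_pairwise (xs : List Int) : (isortB xs).Pairwise (· ≤ ·) := by
  suffices h : ∀ (xs L : List Int), L.Pairwise (· ≤ ·) →
      (xs.foldl (fun acc g => insertP acc g) L).Pairwise (· ≤ ·) by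
    rw [isortB, foldl_insertAsc_eq xs [] (by simp)]
    exact h xs [] (by simp)
  intro xs
  induction xs with
  | nil => intro L hL; simpa using hL
  | cons g rest ih =>
    intro L hL
    rw [List.foldl_cons]
    exact ih _ (insertP_pairwise L g hL)

-- the main invariant: B's fold keeps exactly the last `keep` of the incrementally sorted prefix
theorem foldB_inv (M : Int) (keep : Nat) (hk : keep = (M - 1).toNat) :
    ∀ (xs L : List Int), L.Pairwise (· ≤ ·) →
      xs.foldl (fun top g =>
          let t := insertAsc top g
          if (M - 1 : Int) < (t.length : Int) then t.drop 1 else t)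
        (L.drop (L.length - keep))
      = (xs.foldl (fun acc g => insertAsc acc g) L).drop ((L.length + xs.length) - keep) := by
  intro xs
  induction xs with
  | nil => intro L _; simp
  | cons g rest ih =>
    intro L hL
    rw [List.foldl_cons, List.foldl_cons]
    have hdS : (L.drop (L.length - keep)).Pairwise (· ≤ ·) :=
      hL.sublist (List.drop_sublist _ _)
    dsimp only
    rw [insertAsc_eq_insertP _ g hdS, insertAsc_eq_insertP L g hL]
    have hlen : (insertP (L.drop (L.length - keep)) g).length
        = (L.length - (L.length - keep)) + 1 := by
      rw [insertP_length, List.length_drop]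
    by_cases hcase : keep ≤ L.length
    · -- buffer full: the trim fires
      have hcond : (M - 1 : Int) < ((insertP (L.drop (L.length - keep)) g).length : Int) := by
        rw [hlen]; omega
      rw [if_pos hcond, insertP_drop_tail g _ L hL]
      have h1 : L.length - keep + 1 = (insertP L g).length - keep := by
        rw [insertP_length]; omega
      rw [h1, ih (insertP L g) (insertP_pairwise L g hL)]
      congr 1
      simp only [List.length_cons, insertP_length]
      omega
    · -- buffer not yet full: no trim
      have hd0 : L.length - keep = 0 := by omega
      have hcond : ¬ (M - 1 : Int) < ((insertP (L.drop (L.length - keep)) g).length : Int) := by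
        rw [hlen, hd0]; omega
      rw [if_neg hcond, hd0, List.drop_zero]
      have h2 := ih (insertP L g) (insertP_pairwise L g hL)
      rw [insertP_length, show L.length + 1 - keep = 0 by omega, List.drop_zero] at h2
      rw [h2]
      congr 1
      simp only [List.length_cons]
      omega

-- B's incremental sort coincides with Python's sorted()
theorem isortB_eq_sorted (xs : List Int) :
    isortB xs = PySem.List.sorted xs (fun x => x) false := by
  have hperm : (isortB xs).Perm (PySem.List.sorted xs (fun x => x) false) :=
    (isortB_perm xs).trans (PySem.List.sorted_perm xs (fun x => x) false).symm
  exact hperm.eq_of_pairwise (fun a b _ _ h h' => le_antisymm h h')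
    (isortB_pairwise xs) (PySem.List.sorted_pairwise xs (fun x => x))

-- ===== VERDICT (by name: the statement is the Claim_ definition above) =====
theorem min_sum_of_segments_spec : Claim_equal_min_sum_of_segments := by
  intro N M points _hdom hpre
  unfold Spec_min_sum_of_segments min_sum_of_segments min_sum_of_segments_alt
  dsimp only
  set pts := PySem.List.sorted points (fun x => x) false with hpts
  set raw := (PySem.List.pyRange 0 (N - 1) 1).map
    (fun i => PySem.List.pyGetD pts (i + 1) 0 - PySem.List.pyGetD pts i 0) with hraw
  set asc := PySem.List.sorted raw (fun x => x) false with hasc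
  set span := PySem.List.pyGetD pts (-1) 0 - PySem.List.pyGetD pts 0 0 with hspan
  have hrawlen : raw.length = (N - 1).toNat := by
    rw [hraw, List.length_map, PySem.List.length_pyRange_one]
    omega
  have hasclen : asc.length = (N - 1).toNat := by
    rw [hasc, PySem.List.length_sorted, hrawlen]
  -- A side: span minus the first min(M-1, N-1) entries of the descending sort
  have hdesc : PySem.List.sorted raw (fun x => x) true = asc.reverse := desc_eq_reverse_asc raw
  have hd' : (N - 1 : Int) ≤ (asc.reverse.length : Int) := by
    rw [List.length_reverse, hasclen]; omega
  rw [hdesc, loopA_sum N M asc.reverse hd' 1 0 span le_rfl]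
  simp only [Int.toNat_zero, List.drop_zero, sub_zero]
  -- B side: rewrite the fold over the range as a fold over the raw gap list, then apply the invariant
  have hfold : (PySem.List.pyRange 0 (N - 1) 1).foldl
      (fun top i =>
        let t := insertAsc top (PySem.List.pyGetD pts (i + 1) 0 - PySem.List.pyGetD pts i 0)
        if (M - 1 : Int) < (t.length : Int) then t.drop 1 else t) []
      = raw.foldl (fun top g =>
          let t := insertAsc top g
          if (M - 1 : Int) < (t.length : Int) then t.drop 1 else t) [] := by
    rw [hraw, List.foldl_map]
  rw [hfold]
  have hinv := foldB_inv M (M - 1).toNat rfl raw [] (by simp)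
  simp only [List.length_nil, Nat.zero_sub, List.drop_zero, Nat.zero_add] at hinv
  rw [hinv]
  rw [show raw.foldl (fun acc g => insertAsc acc g) [] = isortB raw from rfl,
    isortB_eq_sorted raw, ← hasc, hrawlen]
  -- both sides are now span minus a sum over a part of asc
  rw [List.take_reverse, List.sum_reverse]
  simp only [hasclen]
  rw [show (N - 1).toNat - (min (M - 1) (N - 1)).toNat = (N - 1).toNat - (M - 1).toNat by omega]
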